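-- pv_equiv track=rewrite | github.com/markalex/advent_of_code_2016 | day_thirteen/day_thirteen_part_two.py | process
-- ===== SOURCE A (Python) =====
-- def process(input):
--     visited = {(1, 1)}
--     current = {(1, 1)}
--     steps = 0
--
--     while True:
--         v = current.copy()
--         current = set()
--         for x, y in v:
--             for a, b in [(x + 1, y), (x - 1, y), (x, y + 1), (x, y - 1)]:
--                 if a < 0 or b < 0:
--                     continue
--                 if is_wall(a, b, input):
--                     continue
--                 if (a, b) in visited:
--                     continue
--                 visited.add((a, b))
--                 current.add((a, b))
--         steps += 1
--
--         if steps == 50: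
--             return len(visited)
--
-- def is_wall(x, y, n):
--     calc = (x*x + 3*x + 2*x*y + y + y*y) + n
--     ones = bin(calc).count('1')
--     return (ones % 2) == 1
-- ===== SOURCE B (Python) =====
-- def process(input):
--     N = 52
--     grid = [[a == 1 and b == 1 for b in range(N)] for a in range(N)]
--     for _ in range(50):
--         grid = [[cell(grid, a, b, input) for b in range(N)] for a in range(N)]
--     return sum(sum(row) for row in grid)
--
-- def cell(grid, a, b, input):
--     if grid[a][b]:
--         return True
--     if is_wall(a, b, input):
--         return False
--     return at(grid, a + 1, b) or at(grid, a - 1, b) or at(grid, a, b + 1) or at(grid, a, b - 1)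
--
-- def at(grid, a, b):
--     if 0 <= a < len(grid) and 0 <= b < len(grid[a]):
--         return grid[a][b]
--     return False
--
-- def is_wall(x, y, n):
--     calc = (x*x + 3*x + 2*x*y + y + y*y) + n
--     ones = bin(calc).count('1')
--     return (ones % 2) == 1
-- ===== Notes on version B (the rewrite author's own statement) =====
-- stated objective: alternative
-- what changed: Replaces A's frontier-set BFS (visited/current sets expanded level by level) with a dense dynamic-programming sweep: fifty relaxation passes over a fixed fifty-two-by-fifty-two boolean grid (a cell becomes reachable if it is open and a neighbour was reachable), then the True cells are counted.
import Mathlib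
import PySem

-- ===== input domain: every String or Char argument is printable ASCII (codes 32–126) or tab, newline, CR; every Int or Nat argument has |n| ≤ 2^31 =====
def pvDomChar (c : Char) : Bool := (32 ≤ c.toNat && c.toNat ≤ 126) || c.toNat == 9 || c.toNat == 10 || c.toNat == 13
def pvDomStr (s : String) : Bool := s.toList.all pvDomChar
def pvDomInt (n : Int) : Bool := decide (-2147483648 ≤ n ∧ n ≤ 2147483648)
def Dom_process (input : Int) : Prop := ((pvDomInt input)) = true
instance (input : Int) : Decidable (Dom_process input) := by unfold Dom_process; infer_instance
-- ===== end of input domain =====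

-- B replaces A's frontier-set BFS by a dense-grid dynamic programming sweep (50 relaxation
-- passes over a fixed 52×52 boolean grid, then a count); objective: alternative algorithm.

-- ===== PORT A =====

-- bin(calc).count('1') counts the binary ones of |calc| (the '-0b' prefix holds no '1');
-- PySem.Int.bitCount is exactly that.
def is_wall (x y n : Int) : Bool :=
  let c := (x*x + 3*x + 2*x*y + y + y*y) + n
  let ones := PySem.Int.bitCount c
  (ones % 2) == 1

-- the literal neighbour list [(x+1,y),(x-1,y),(x,y+1),(x,y-1)]
def neigh (x y : Int) : List (Int × Int) := [(x+1,y),(x-1,y),(x,y+1),(x,y-1)]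

-- the body of A's inner 'for a, b in [...]' loop: one candidate cell
def updA (input : Int) (st : PySem.Set (Int × Int) × PySem.Set (Int × Int)) (ab : Int × Int) :
    PySem.Set (Int × Int) × PySem.Set (Int × Int) :=
  if ab.1 < 0 ∨ ab.2 < 0 then st
  else if is_wall ab.1 ab.2 input then st
  else if PySem.Set.contains st.1 ab then st
  else (PySem.Set.add st.1 ab, PySem.Set.add st.2 ab)

-- A's 'for x, y in v' body: the four neighbours of one frontier cell
def stepCellA (input : Int) (st : PySem.Set (Int × Int) × PySem.Set (Int × Int))
    (xy : Int × Int) : PySem.Set (Int × Int) × PySem.Set (Int × Int) :=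
  (neigh xy.1 xy.2).foldl (updA input) st

-- A's 'while True' loop: steps counts up to 50, ported as recursion on the 50 - steps
-- iterations that remain; at 0 it returns len(visited).
def aLoop (input : Int) : Nat → PySem.Set (Int × Int) → PySem.Set (Int × Int) → Int
  | 0, visited, _ => PySem.Set.len visited
  | n+1, visited, current =>
      let st := current.foldl (stepCellA input) (visited, PySem.Set.empty)
      aLoop input n st.1 st.2

def process (input : Int) : Int :=
  aLoop input 50 (PySem.Set.ofList [(1,1)]) (PySem.Set.ofList [(1,1)])

-- ===== PORT B =====

-- at(grid, a, b): bounds-checked read, False outside the grid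
def atB (g : List (List Bool)) (a b : Int) : Bool :=
  if 0 ≤ a ∧ a < PySem.List.len g ∧ 0 ≤ b ∧ b < PySem.List.len (PySem.List.pyGetD g a []) then
    PySem.List.pyGetD (PySem.List.pyGetD g a []) b false
  else false

-- cell(grid, a, b, input); grid[a][b] is ported with pyGetD: callers index with 0 ≤ a,b < 52,
-- where pyGetD is exactly Python's grid[a][b]
def cellB (g : List (List Bool)) (a b input : Int) : Bool :=
  if PySem.List.pyGetD (PySem.List.pyGetD g a []) b false then true
  else if is_wall a b input then false
  else atB g (a+1) b || atB g (a-1) b || atB g a (b+1) || atB g a (b-1)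

-- one relaxation pass: the nested list comprehension over range(52) × range(52)
def bStep (input : Int) (g : List (List Bool)) : List (List Bool) :=
  (PySem.List.pyRange 0 52 1).map (fun a =>
    (PySem.List.pyRange 0 52 1).map (fun b => cellB g a b input))

-- the initial grid [[a == 1 and b == 1 for b in range(N)] for a in range(N)]
def bInit : List (List Bool) :=
  (PySem.List.pyRange 0 52 1).map (fun a =>
    (PySem.List.pyRange 0 52 1).map (fun b => a == 1 && b == 1))

-- sum(sum(row) for row in grid): sum of booleans counts the Trues
def process_alt (input : Int) : Int :=
  let g := (PySem.List.pyRange 0 50 1).foldl (fun g _ => bStep input g) bInit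
  (g.map (fun row => ((row.countP (fun x => x) : Nat) : Int))).sum

-- ===== PRECONDITION & SPEC =====
def Spec_process (input : Int) (out : Int) : Prop := out = process_alt input
instance (input : Int) (out : Int) : Decidable (Spec_process input out) := by unfold Spec_process; infer_instance

-- ===== CLAIM (what is proved, stated in full; the proofs are below) =====
def Claim_equal_process : Prop := ∀ (input : Int), Dom_process input → Spec_process input (process input)

-- ===== LEMMAS AND PROOFS =====

-- 'the cell is allowed': non-negative coordinates and not a wall (A's three guards)
def goodB (input : Int) (c : Int × Int) : Bool :=
  decide (0 ≤ c.1) && decide (0 ≤ c.2) && !(is_wall c.1 c.2 input)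

-- cells reachable from (1,1) in at most k steps through allowed cells
def reachB (input : Int) : Nat → Int × Int → Bool
  | 0, c => c == ((1 : Int), (1 : Int))
  | k+1, c => reachB input k c ||
      (goodB input c && (neigh c.1 c.2).any (fun d => reachB input k d))

-- the BFS frontier at depth k: reachable in k steps but not in k-1
def frontB (input : Int) : Nat → Int × Int → Bool
  | 0, c => reachB input 0 c
  | k+1, c => reachB input (k+1) c && !reachB input k c

lemma mem_neigh_symm (c d : Int × Int) : c ∈ neigh d.1 d.2 ↔ d ∈ neigh c.1 c.2 := by
  obtain ⟨x, y⟩ := c; obtain ⟨u, v⟩ := d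
  simp [neigh, Prod.ext_iff]
  omega

lemma reach_bounds (input : Int) : ∀ (k : Nat) (c : Int × Int), reachB input k c = true →
    0 ≤ c.1 ∧ 0 ≤ c.2 ∧ c.1 ≤ 1 + k ∧ c.2 ≤ 1 + k := by
  intro k
  induction k with
  | zero =>
      rintro ⟨x, y⟩ h
      simp [reachB, Prod.ext_iff] at h
      obtain ⟨h1, h2⟩ := h
      subst h1; subst h2; norm_num
  | succ k ih =>
      rintro ⟨x, y⟩ h
      simp [reachB, neigh, goodB] at h
      rcases h with h | ⟨⟨⟨hx, hy⟩, _⟩, h⟩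
      · obtain ⟨h1, h2, h3, h4⟩ := ih _ h
        simp at h1 h2 h3 h4 ⊢; omega
      · rcases h with h | h | h | h <;>
          · obtain ⟨h1, h2, h3, h4⟩ := ih _ h
            simp at h1 h2 h3 h4 ⊢; omega

lemma reach_mono (input : Int) (k : Nat) (c : Int × Int) (h : reachB input k c = true) :
    reachB input (k+1) c = true := by
  simp [reachB]; exact Or.inl h

lemma reach_closure (input : Int) (k : Nat) (c d : Int × Int)
    (hd : d ∈ neigh c.1 c.2) (hr : reachB input k d = true) (hg : goodB input c = true) :
    reachB input (k+1) c = true := by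
  have hany : (neigh c.1 c.2).any (fun d => reachB input k d) = true :=
    List.any_eq_true.mpr ⟨d, hd, hr⟩
  show (reachB input k c || (goodB input c && (neigh c.1 c.2).any (fun d => reachB input k d))) = true
  rw [hg, hany]
  simp

lemma front_subset_reach (input : Int) (k : Nat) (c : Int × Int)
    (h : frontB input k c = true) : reachB input k c = true := by
  cases k with
  | zero => exact h
  | succ k => simp [frontB] at h; exact h.1

lemma reach_frontier (input : Int) (k : Nat) (c : Int × Int)
    (h1 : reachB input (k+1) c = true) (h2 : reachB input k c = false) :
    goodB input c = true ∧ ∃ d ∈ neigh c.1 c.2, frontB input k d = true := by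
  have h1' : (reachB input k c || (goodB input c && (neigh c.1 c.2).any (fun d => reachB input k d))) = true := h1
  rw [h2, Bool.false_or, Bool.and_eq_true, List.any_eq_true] at h1'
  obtain ⟨hg, d, hd, hr⟩ := h1'
  refine ⟨hg, d, hd, ?_⟩
  cases k with
  | zero => exact hr
  | succ m =>
      have : frontB input (m+1) d = (reachB input (m+1) d && !reachB input m d) := rfl
      rw [this, Bool.and_eq_true, Bool.not_eq_true', hr]
      refine ⟨rfl, ?_⟩
      by_contra hcon
      rw [Bool.not_eq_false] at hcon
      have hc := reach_closure input m c d hd hcon hg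
      rw [hc] at h2
      cases h2

lemma updA_mem (input : Int) (v cur : PySem.Set (Int × Int)) (d c : Int × Int) :
    (c ∈ (updA input (v, cur) d).1 ↔ (c ∈ v ∨ (c = d ∧ goodB input d = true))) ∧
    (c ∈ (updA input (v, cur) d).2 ↔ (c ∈ cur ∨ (c = d ∧ goodB input d = true ∧ d ∉ v))) := by
  unfold updA
  split_ifs with h1 h2 h3
  · have hg : goodB input d = false := by
      simp [goodB]
      intro hx hy
      rcases h1 with h | h
      · exact absurd hx (by omega)
      · exact absurd hy (by omega)
    simp [hg]
  · have hg : goodB input d = false := by simp [goodB, h2]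
    simp [hg]
  · have hdv : d ∈ v := (PySem.Set.contains_iff v d).mp h3
    constructor
    · constructor
      · intro h
        exact Or.inl h
      · rintro (h | ⟨rfl, -⟩)
        · exact h
        · exact hdv
    · constructor
      · intro h
        exact Or.inl h
      · rintro (h | ⟨rfl, -, hnv⟩)
        · exact h
        · exact absurd hdv hnv
  · have hdv : d ∉ v := fun h => h3 ((PySem.Set.contains_iff v d).mpr h)
    have hg : goodB input d = true := by
      rw [not_or] at h1
      obtain ⟨h1a, h1b⟩ := h1
      simp [goodB, h2]
      exact ⟨by omega, by omega⟩
    simp only [PySem.Set.mem_add]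
    constructor
    · constructor
      · rintro (h | rfl)
        · exact Or.inl h
        · exact Or.inr ⟨rfl, hg⟩
      · rintro (h | ⟨rfl, -⟩)
        · exact Or.inl h
        · exact Or.inr rfl
    · constructor
      · rintro (h | rfl)
        · exact Or.inl h
        · exact Or.inr ⟨rfl, hg, hdv⟩
      · rintro (h | ⟨rfl, -, -⟩)
        · exact Or.inl h
        · exact Or.inr rfl

lemma foldl_updA_mem (input : Int) (l : List (Int × Int)) :
    ∀ (v cur : PySem.Set (Int × Int)), (∀ c, c ∈ cur → c ∈ v) →
    ∀ c, (c ∈ (l.foldl (updA input) (v, cur)).1 ↔ (c ∈ v ∨ (c ∈ l ∧ goodB input c = true))) ∧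
         (c ∈ (l.foldl (updA input) (v, cur)).2 ↔ (c ∈ cur ∨ (c ∈ l ∧ goodB input c = true ∧ c ∉ v))) := by
  induction l with
  | nil => intro v cur _ c; simp
  | cons d l ih =>
      intro v cur hsub c
      simp only [List.foldl_cons]
      have hst : updA input (v, cur) d = ((updA input (v, cur) d).1, (updA input (v, cur) d).2) := rfl
      rw [hst]
      have hsub' : ∀ x, x ∈ (updA input (v, cur) d).2 → x ∈ (updA input (v, cur) d).1 := by
        intro x hx
        have h2 := (updA_mem input v cur d x).2.mp hx
        apply (updA_mem input v cur d x).1.mpr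
        rcases h2 with h | ⟨rfl, hg, _⟩
        · exact Or.inl (hsub x h)
        · exact Or.inr ⟨rfl, hg⟩
      have IH := ih (updA input (v, cur) d).1 (updA input (v, cur) d).2 hsub' c
      obtain ⟨IH1, IH2⟩ := IH
      have U1 := (updA_mem input v cur d c).1
      have U2 := (updA_mem input v cur d c).2
      constructor
      · rw [IH1, U1]
        simp only [List.mem_cons]
        constructor
        · rintro ((h | ⟨rfl, hg⟩) | ⟨hl, hg⟩)
          · exact Or.inl h
          · exact Or.inr ⟨Or.inl rfl, hg⟩
          · exact Or.inr ⟨Or.inr hl, hg⟩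
        · rintro (h | ⟨(rfl | hl), hg⟩)
          · exact Or.inl (Or.inl h)
          · exact Or.inl (Or.inr ⟨rfl, hg⟩)
          · exact Or.inr ⟨hl, hg⟩
      · rw [IH2, U2, U1]
        simp only [List.mem_cons]
        constructor
        · rintro ((h | ⟨rfl, hg, hnv⟩) | ⟨hl, hg, hnv⟩)
          · exact Or.inl h
          · exact Or.inr ⟨Or.inl rfl, hg, hnv⟩
          · have hcv : c ∉ v := fun hv => hnv (Or.inl hv)
            exact Or.inr ⟨Or.inr hl, hg, hcv⟩
        · rintro (h | ⟨(rfl | hl), hg, hnv⟩)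
          · exact Or.inl (Or.inl h)
          · exact Or.inl (Or.inr ⟨rfl, hg, hnv⟩)
          · by_cases hcd : c = d
            · subst hcd; exact Or.inl (Or.inr ⟨rfl, hg, hnv⟩)
            · refine Or.inr ⟨hl, hg, ?_⟩
              rintro (hv | ⟨rfl, _⟩)
              · exact hnv hv
              · exact hcd rfl

lemma foldl_updA_nodup (input : Int) (l : List (Int × Int)) :
    ∀ (v cur : PySem.Set (Int × Int)), v.Nodup → cur.Nodup →
    (l.foldl (updA input) (v, cur)).1.Nodup ∧ (l.foldl (updA input) (v, cur)).2.Nodup := by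
  induction l with
  | nil => intro v cur hv hc; exact ⟨hv, hc⟩
  | cons d l ih =>
      intro v cur hv hc
      simp only [List.foldl_cons]
      have hst : updA input (v, cur) d = ((updA input (v, cur) d).1, (updA input (v, cur) d).2) := rfl
      rw [hst]
      refine ih _ _ ?_ ?_
      · unfold updA
        split_ifs <;> simp only [] <;> first | exact hv | exact PySem.Set.nodup_add v d hv
      · unfold updA
        split_ifs <;> simp only [] <;> first | exact hc | exact PySem.Set.nodup_add cur d hc

lemma aLoop_spec (input : Int) : ∀ (n k : Nat) (v cur : PySem.Set (Int × Int)),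
    v.Nodup → cur.Nodup → (∀ c, c ∈ cur → c ∈ v) →
    (∀ c, c ∈ v ↔ reachB input k c = true) → (∀ c, c ∈ cur ↔ frontB input k c = true) →
    ∃ w : List (Int × Int), aLoop input n v cur = PySem.Set.len w ∧ w.Nodup ∧
      (∀ c, c ∈ w ↔ reachB input (k+n) c = true) := by
  intro n
  induction n with
  | zero =>
      intro k v cur hv _ _ hvr _
      exact ⟨v, rfl, hv, by simpa using hvr⟩
  | succ n ih =>
      intro k v cur hv hcn hsub hvr hcf
      have hflat : cur.foldl (stepCellA input) (v, PySem.Set.empty) =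
          (cur.flatMap (fun x => neigh x.1 x.2)).foldl (updA input) (v, PySem.Set.empty) :=
        (List.foldl_flatMap).symm
      have hstep : aLoop input (n+1) v cur =
          aLoop input n ((cur.flatMap (fun x => neigh x.1 x.2)).foldl (updA input) (v, PySem.Set.empty)).1
                        ((cur.flatMap (fun x => neigh x.1 x.2)).foldl (updA input) (v, PySem.Set.empty)).2 := by
        show aLoop input n (cur.foldl (stepCellA input) (v, PySem.Set.empty)).1
              (cur.foldl (stepCellA input) (v, PySem.Set.empty)).2 = _
        rw [hflat]
      set L : List (Int × Int) := cur.flatMap (fun x => neigh x.1 x.2) with hL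
      set st := L.foldl (updA input) (v, PySem.Set.empty) with hst
      have hmem := foldl_updA_mem input L v PySem.Set.empty (by intro c h; cases h)
      have hnd := foldl_updA_nodup input L v PySem.Set.empty hv (List.nodup_nil)
      have hmemL : ∀ c : Int × Int, c ∈ L ↔ ∃ d ∈ cur, c ∈ neigh d.1 d.2 := by
        intro c; rw [hL, List.mem_flatMap]
      have hreach : ∀ c : Int × Int, (c ∈ L ∧ goodB input c = true) → reachB input (k+1) c = true := by
        rintro c ⟨hcl, hg⟩
        obtain ⟨d, hdc, hcd⟩ := (hmemL c).mp hcl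
        have hdr : reachB input k d = true := front_subset_reach input k d ((hcf d).mp hdc)
        exact reach_closure input k c d ((mem_neigh_symm c d).mp hcd) hdr hg
      have hv' : ∀ c, c ∈ st.1 ↔ reachB input (k+1) c = true := by
        intro c
        rw [(hmem c).1]
        constructor
        · rintro (h | h)
          · exact reach_mono input k c ((hvr c).mp h)
          · exact hreach c h
        · intro h
          by_cases hk : reachB input k c = true
          · exact Or.inl ((hvr c).mpr hk)
          · obtain ⟨hg, d, hd, hf⟩ :=
              reach_frontier input k c h (by rwa [Bool.not_eq_true] at hk)
            refine Or.inr ⟨?_, hg⟩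
            exact (hmemL c).mpr ⟨d, (hcf d).mpr hf, (mem_neigh_symm c d).mpr hd⟩
      have hc' : ∀ c, c ∈ st.2 ↔ frontB input (k+1) c = true := by
        intro c
        rw [(hmem c).2]
        have hfr : frontB input (k+1) c = (reachB input (k+1) c && !reachB input k c) := rfl
        constructor
        · rintro (h | ⟨hcl, hg, hnv⟩)
          · cases h
          · rw [hfr, Bool.and_eq_true, Bool.not_eq_true']
            refine ⟨hreach c ⟨hcl, hg⟩, ?_⟩
            rw [← Bool.not_eq_true]
            intro hk
            exact hnv ((hvr c).mpr hk)
        · intro h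
          rw [hfr, Bool.and_eq_true, Bool.not_eq_true'] at h
          obtain ⟨h1, h2⟩ := h
          obtain ⟨hg, d, hd, hf⟩ := reach_frontier input k c h1 h2
          refine Or.inr ⟨(hmemL c).mpr ⟨d, (hcf d).mpr hf, (mem_neigh_symm c d).mpr hd⟩, hg, ?_⟩
          intro hcv
          rw [(hvr c).mp hcv] at h2
          cases h2
      have hsub' : ∀ c, c ∈ st.2 → c ∈ st.1 := by
        intro c h
        exact (hv' c).mpr (front_subset_reach input (k+1) c ((hc' c).mp h))
      obtain ⟨w, hw1, hw2, hw3⟩ := ih (k+1) st.1 st.2 hnd.1 hnd.2 hsub' hv' hc'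
      refine ⟨w, ?_, hw2, ?_⟩
      · rw [hstep, hw1]
      · intro c
        rw [hw3 c]
        have : k + 1 + n = k + (n + 1) := by omega
        rw [this]

-- the grid whose (a,b) entry says 'reachable within k steps'
def mapGrid (input : Int) (k : Nat) : List (List Bool) :=
  (PySem.List.pyRange 0 52 1).map (fun a =>
    (PySem.List.pyRange 0 52 1).map (fun b => reachB input k (a, b)))

lemma bInit_eq (input : Int) : bInit = mapGrid input 0 := by
  unfold bInit mapGrid
  refine List.map_congr_left ?_
  intro a _
  refine List.map_congr_left ?_
  intro b _
  rfl

lemma pyGetD_mapGrid (input : Int) (k : Nat) (a b : Int)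
    (ha : 0 ≤ a ∧ a < 52) (hb : 0 ≤ b ∧ b < 52) :
    PySem.List.pyGetD (PySem.List.pyGetD (mapGrid input k) a []) b false = reachB input k (a, b) := by
  unfold mapGrid
  rw [PySem.List.pyGetD_map_pyRange_of_nonneg _ 52 a [] ha.1 ha.2]
  rw [PySem.List.pyGetD_map_pyRange_of_nonneg _ 52 b false hb.1 hb.2]

lemma atB_mapGrid (input : Int) (k : Nat) (hk : k ≤ 49) (a b : Int) :
    atB (mapGrid input k) a b = reachB input k (a, b) := by
  have hlen : PySem.List.len (mapGrid input k) = 52 := by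
    simp [mapGrid, PySem.List.length_pyRange_one]
  by_cases hin : (0 ≤ a ∧ a < 52) ∧ (0 ≤ b ∧ b < 52)
  · have hrow : PySem.List.pyGetD (mapGrid input k) a [] =
        (PySem.List.pyRange 0 52 1).map (fun b => reachB input k (a, b)) := by
      unfold mapGrid
      rw [PySem.List.pyGetD_map_pyRange_of_nonneg _ 52 a [] hin.1.1 hin.1.2]
    unfold atB
    rw [if_pos]
    · exact pyGetD_mapGrid input k a b hin.1 hin.2
    · refine ⟨hin.1.1, ?_, hin.2.1, ?_⟩
      · rw [hlen]; exact hin.1.2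
      · rw [hrow]
        simp [PySem.List.length_pyRange_one]
        exact hin.2.2
  · have hr : reachB input k (a, b) = false := by
      cases hr : reachB input k (a, b)
      · rfl
      · obtain ⟨h1, h2, h3, h4⟩ := reach_bounds input k (a, b) hr
        simp at h1 h2 h3 h4
        exfalso
        apply hin
        have hk52 : (1 : Int) + k ≤ 50 := by
          have : (k : Int) ≤ 49 := by exact_mod_cast hk
          omega
        exact ⟨⟨h1, by omega⟩, ⟨h2, by omega⟩⟩
    rw [hr]
    unfold atB
    rw [if_neg]
    intro ⟨c1, c2, c3, c4⟩
    rw [hlen] at c2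
    apply hin
    refine ⟨⟨c1, c2⟩, c3, ?_⟩
    have hrow : PySem.List.pyGetD (mapGrid input k) a [] =
        (PySem.List.pyRange 0 52 1).map (fun b => reachB input k (a, b)) := by
      unfold mapGrid
      rw [PySem.List.pyGetD_map_pyRange_of_nonneg _ 52 a [] c1 c2]
    rw [hrow] at c4
    simpa [PySem.List.length_pyRange_one] using c4

lemma cellB_mapGrid (input : Int) (k : Nat) (hk : k ≤ 49) (a b : Int)
    (ha : 0 ≤ a ∧ a < 52) (hb : 0 ≤ b ∧ b < 52) :
    cellB (mapGrid input k) a b input = reachB input (k+1) (a, b) := by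
  unfold cellB
  rw [pyGetD_mapGrid input k a b ha hb]
  have hrw : reachB input (k+1) (a, b) = (reachB input k (a, b) ||
      (goodB input (a, b) && (neigh a b).any (fun d => reachB input k d))) := rfl
  cases hr : reachB input k (a, b)
  · rw [if_neg (by simp)]
    by_cases hw : is_wall a b input = true
    · rw [if_pos hw, hrw, hr]
      simp [goodB, hw]
    · rw [if_neg hw, hrw, hr]
      have hg : goodB input (a, b) = true := by
        simp [goodB, hw]
        exact ⟨ha.1, hb.1⟩
      rw [hg]
      rw [atB_mapGrid input k hk (a+1) b, atB_mapGrid input k hk (a-1) b,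
          atB_mapGrid input k hk a (b+1), atB_mapGrid input k hk a (b-1)]
      simp [neigh, Bool.or_assoc]
  · rw [if_pos rfl, hrw, hr]
    simp

lemma bStep_mapGrid (input : Int) (k : Nat) (hk : k ≤ 49) :
    bStep input (mapGrid input k) = mapGrid input (k+1) := by
  unfold bStep
  show _ = (PySem.List.pyRange 0 52 1).map (fun a =>
    (PySem.List.pyRange 0 52 1).map (fun b => reachB input (k+1) (a, b)))
  refine List.map_congr_left ?_
  intro a ha
  refine List.map_congr_left ?_
  intro b hb
  rw [PySem.List.mem_pyRange_one] at ha hb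
  exact cellB_mapGrid input k hk a b ha hb

lemma bIter_eq (input : Int) : ∀ (m : Nat), m ≤ 50 →
    (PySem.List.pyRange 0 (m : Int) 1).foldl (fun g _ => bStep input g) bInit = mapGrid input m := by
  intro m
  induction m with
  | zero =>
      intro _
      rw [PySem.List.pyRange_one_eq_nil (by norm_num)]
      exact bInit_eq input
  | succ m ih =>
      intro hm
      have hcast : ((m + 1 : Nat) : Int) = (m : Int) + 1 := by push_cast; ring
      rw [hcast, PySem.List.pyRange_one_succ_right (by positivity), List.foldl_append]
      rw [ih (by omega)]
      simp only [List.foldl_cons, List.foldl_nil]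
      exact bStep_mapGrid input m (by omega)

lemma prod_filter_length (R : Int × Int → Bool) (l : List Int) :
    ((((l ×ˢ l).filter R).length : Nat) : Int) =
      (l.map (fun a => ((l.countP (fun b => R (a, b)) : Nat) : Int))).sum := by
  simp [SProd.sprod, List.product, List.filter_flatMap, List.length_flatMap, List.filter_map,
    List.map_map, Function.comp_def, List.countP_eq_length_filter, Nat.cast_list_sum]

lemma process_alt_eq (input : Int) :
    process_alt input =
      ((((PySem.List.pyRange 0 52 1) ×ˢ (PySem.List.pyRange 0 52 1)).filter
        (fun c => reachB input 50 c)).length : Int) := by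
  have hfold : (PySem.List.pyRange 0 50 1).foldl (fun g _ => bStep input g) bInit = mapGrid input 50 := by
    have h := bIter_eq input 50 (le_refl _)
    norm_num at h
    exact h
  have hlet : process_alt input = (((PySem.List.pyRange 0 50 1).foldl (fun g _ => bStep input g)
      bInit).map (fun row => ((row.countP (fun x => x) : Nat) : Int))).sum := rfl
  rw [hlet, hfold]
  unfold mapGrid
  rw [prod_filter_length (fun c => reachB input 50 c) (PySem.List.pyRange 0 52 1)]
  simp only [List.map_map, Function.comp_def, List.countP_map]

theorem process_spec' (input : Int) : process input = process_alt input := by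
  obtain ⟨w, hw1, hw2, hw3⟩ := aLoop_spec input 50 0 [((1:Int),(1:Int))] [((1:Int),(1:Int))]
    (by simp) (by simp)
    (by intro c h; exact h)
    (by intro c; simp [reachB])
    (by intro c; simp [frontB, reachB])
  have hw3' : ∀ c, c ∈ w ↔ reachB input 50 c = true := by
    intro c
    have := hw3 c
    norm_num at this
    exact this
  set Lfin := (((PySem.List.pyRange 0 52 1) ×ˢ (PySem.List.pyRange 0 52 1)).filter
    (fun c => reachB input 50 c)) with hLfin
  have hnd : Lfin.Nodup :=
    List.Nodup.filter _ (List.Nodup.product (PySem.List.nodup_pyRange_one 0 52) (PySem.List.nodup_pyRange_one 0 52))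
  have hmemL : ∀ c, c ∈ Lfin ↔ reachB input 50 c = true := by
    intro c
    rw [hLfin, List.mem_filter]
    constructor
    · intro h
      exact h.2
    · intro h
      refine ⟨?_, h⟩
      obtain ⟨h1, h2, h3, h4⟩ := reach_bounds input 50 c h
      norm_num at h3 h4
      rw [List.mem_product, PySem.List.mem_pyRange_one, PySem.List.mem_pyRange_one]
      exact ⟨⟨h1, by omega⟩, ⟨h2, by omega⟩⟩
  have hperm : w.Perm Lfin :=
    (List.perm_ext_iff_of_nodup hw2 hnd).mpr (fun c => (hw3' c).trans (hmemL c).symm)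
  have hproc : process input = PySem.Set.len w := hw1
  rw [hproc, process_alt_eq input, ← hLfin]
  show (w.length : Int) = (Lfin.length : Int)
  rw [hperm.length_eq]

-- ===== VERDICT (by name: the statement is the Claim_ definition above) =====
theorem process_spec : Claim_equal_process := by
  intro input _
  unfold Spec_process
  exact process_spec' input
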